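-- pv_equiv track=rewrite | github.com/colincen/labelembedding_emamplar | tools/DataSet/SNIPS.py | prepareDataBySlot
-- ===== SOURCE A (Python) =====
-- def prepareDataBySlot(da):
--     slot2exemplar = {}
--     for line in da:
--         data, label = line[0], line[1]
--         assert len(data) == len(label)
--         i = 0
--         while i < len(data):
--             fg = False
--             if label[i][0] == 'B':
--                 fg = True
--                 start = i
--                 end = i + 1
--                 while end < len(data) and label[end][0] == 'I':
--                     end += 1
--                 end = min(end, len(data))
--                 slotName = label[i][2:]
--                 temp = [[], [], []]
--                 if slotName not in slot2exemplar:
--                     slot2exemplar[slotName] = []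
--                 for j in range(0, start):
--                     temp[0].append(data[j])
--                 for j in range(start, end):
--                     temp[1].append(data[j])
--                 for j in range(end, len(data)):
--                     temp[2].append(data[j])
--                 assert len(temp) == 3
--                 slot2exemplar[slotName].append(temp)
--                 i = end
--
--             if not fg:
--                 i += 1
--     return slot2exemplar
-- ===== SOURCE B (Python) =====
-- def prepareDataBySlot(da):
--     slot2exemplar = {}
--     for data, label in da:
--         assert len(data) == len(label)
--         spans = []
--         for i, lab in enumerate(label):
--             if lab[0] == 'B':
--                 spans.append((lab[2:], i, i + 1))
--             elif lab[0] == 'I' and spans and spans[-1][2] == i: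
--                 name, s, _ = spans.pop()
--                 spans.append((name, s, i + 1))
--         for name, s, e in spans:
--             slot2exemplar[name] = slot2exemplar.get(name, []) + [
--                 [list(data[:s]), list(data[s:e]), list(data[e:])]]
--     return slot2exemplar
-- ===== Notes on version B (the rewrite author's own statement) =====
-- stated objective: simpler
-- what changed: Replaced A's index-based while-loop (with an inner while advancing 'end' and three explicit index-append loops per slot) by a two-pass decomposition: one enumerate pass collects all (slot, start, end) spans, a second pass builds each exemplar by list slicing.
import Mathlib
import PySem

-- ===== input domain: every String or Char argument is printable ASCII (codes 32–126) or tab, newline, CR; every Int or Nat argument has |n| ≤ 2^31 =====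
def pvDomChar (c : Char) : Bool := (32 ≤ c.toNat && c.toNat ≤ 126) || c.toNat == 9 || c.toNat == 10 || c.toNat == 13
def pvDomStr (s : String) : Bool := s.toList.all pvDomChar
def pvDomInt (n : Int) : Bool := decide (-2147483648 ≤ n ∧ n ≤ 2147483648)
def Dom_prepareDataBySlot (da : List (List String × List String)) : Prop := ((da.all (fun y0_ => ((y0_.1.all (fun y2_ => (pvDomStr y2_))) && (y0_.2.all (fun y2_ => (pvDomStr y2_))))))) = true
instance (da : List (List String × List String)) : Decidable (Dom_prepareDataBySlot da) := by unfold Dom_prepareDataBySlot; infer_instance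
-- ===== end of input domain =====

-- B replaces A's nested while-loops and per-index append loops by a two-pass decomposition
-- (collect (slot,start,end) spans, then build exemplars by slicing); objective: simpler.

-- ===== PORT A =====
-- inner while:  while end < len(data) and label[end][0] == 'I': end += 1
def aFindEnd (label : List String) (n e : Nat) : Nat :=
  if h : e < n ∧ (label.getD e "").toList.head? = some 'I' then aFindEnd label n (e + 1) else e
  termination_by n - e
  decreasing_by omega

-- needed by aLine's termination proof
theorem aFindEnd_ge (label : List String) (n e : Nat) : e ≤ aFindEnd label n e := by
  unfold aFindEnd
  split
  · have := aFindEnd_ge label n (e + 1); omega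
  · exact le_refl e
  termination_by n - e
  decreasing_by simp_all; omega

-- outer while over i (fg/B branch sets i := end, otherwise i += 1)
def aLine (data label : List String) (n i : Nat)
    (d : PySem.Dict String (List (List (List String)))) :
    PySem.Dict String (List (List (List String))) :=
  if hi : i < n then
    if (label.getD i "").toList.head? = some 'B' then
      let e := min (aFindEnd label n (i + 1)) n
      let slotName := PySem.Str.slice (label.getD i "") (some 2) none
      let d1 := if d.contains slotName = false then d.insert slotName [] else d
      let t0 := (PySem.List.pyRange 0 (i : Int) 1).foldl (fun acc j => acc ++ [PySem.List.pyGetD data j ""]) []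
      let t1 := (PySem.List.pyRange (i : Int) (e : Int) 1).foldl (fun acc j => acc ++ [PySem.List.pyGetD data j ""]) []
      let t2 := (PySem.List.pyRange (e : Int) (n : Int) 1).foldl (fun acc j => acc ++ [PySem.List.pyGetD data j ""]) []
      aLine data label n e (d1.insert slotName (d1.getD slotName [] ++ [[t0, t1, t2]]))
    else aLine data label n (i + 1) d
  else d
  termination_by n - i
  decreasing_by
  · have := aFindEnd_ge label n (i + 1); omega
  · omega

def prepareDataBySlot (da : List (List String × List String)) : List (String × List (List (List String))) :=
  (da.foldl (fun d line => aLine line.1 line.2 line.1.length 0 d)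
    (PySem.Dict.empty : PySem.Dict String (List (List (List String))))).items

-- ===== PORT B =====
-- one enumerate step of the span-collecting pass
def bStep (spans : List (String × Int × Int)) (p : Int × String) : List (String × Int × Int) :=
  if p.2.toList.head? = some 'B' then
    spans ++ [(PySem.Str.slice p.2 (some 2) none, p.1, p.1 + 1)]
  else if p.2.toList.head? = some 'I' then
    match spans.getLast? with
    | some last => if last.2.2 = p.1 then spans.dropLast ++ [(last.1, last.2.1, p.1 + 1)] else spans
    | none => spans
  else spans

-- [list(data[:s]), list(data[s:e]), list(data[e:])]
def bExemplar (data : List String) (s e : Int) : List (List String) :=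
  [PySem.List.slice data none (some s), PySem.List.slice data (some s) (some e),
   PySem.List.slice data (some e) none]

def bLine (d : PySem.Dict String (List (List (List String)))) (data label : List String) :
    PySem.Dict String (List (List (List String))) :=
  ((PySem.List.enumerate label 0).foldl bStep []).foldl
    (fun d sp => d.modify sp.1 [] (· ++ [bExemplar data sp.2.1 sp.2.2])) d

def prepareDataBySlot_alt (da : List (List String × List String)) : List (String × List (List (List String))) :=
  (da.foldl (fun d line => bLine d line.1 line.2)
    (PySem.Dict.empty : PySem.Dict String (List (List (List String))))).items

-- ===== PRECONDITION & SPEC =====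
-- Pre_ excludes exactly the inputs on which Python A raises: a line whose token and label
-- lists have different lengths (assert), or an empty label string (label[i][0] IndexError).
def Pre_prepareDataBySlot (da : List (List String × List String)) : Prop :=
  ∀ line ∈ da, line.1.length = line.2.length ∧ ∀ s ∈ line.2, s ≠ ""
instance (da : List (List String × List String)) : Decidable (Pre_prepareDataBySlot da) := by
  unfold Pre_prepareDataBySlot; infer_instance

def pvWitness_prepareDataBySlot : (List (List String × List String)) :=
  [(["play", "a", "song"], ["O", "O", "B-music"]), (["hi"], ["B-x"])]

def Spec_prepareDataBySlot (da : List (List String × List String)) (out : List (String × List (List (List String)))) : Prop := out = prepareDataBySlot_alt da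
instance (da : List (List String × List String)) (out : List (String × List (List (List String)))) : Decidable (Spec_prepareDataBySlot da out) := by unfold Spec_prepareDataBySlot; infer_instance

-- ===== CLAIM (what is proved, stated in full; the proofs are below) =====
def Claim_equal_prepareDataBySlot : Prop := ∀ (da : List (List String × List String)), Dom_prepareDataBySlot da → Pre_prepareDataBySlot da → Spec_prepareDataBySlot da (prepareDataBySlot da)

-- ===== LEMMAS AND PROOFS =====

-- the list of slot spans, as A's scan produces them
def spansFrom (label : List String) (n i : Nat) : List (String × Int × Int) :=
  if hi : i < n then
    if (label.getD i "").toList.head? = some 'B' then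
      let e := min (aFindEnd label n (i + 1)) n
      (PySem.Str.slice (label.getD i "") (some 2) none, (i : Int), (e : Int)) :: spansFrom label n e
    else spansFrom label n (i + 1)
  else []
  termination_by n - i
  decreasing_by
  · have := aFindEnd_ge label n (i + 1); omega
  · omega

-- the per-span dict update of B
def bUpd (data : List String) (d : PySem.Dict String (List (List (List String)))) (sp : String × Int × Int) :
    PySem.Dict String (List (List (List String)))  :=
  d.modify sp.1 [] (· ++ [bExemplar data sp.2.1 sp.2.2])

theorem subT (data : List String) (a b : Nat) (hab : a ≤ b) (hb : b ≤ data.length) (acc : List String) :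
    (PySem.List.pyRange (a : Int) (b : Int) 1).foldl (fun acc j => acc ++ [PySem.List.pyGetD data j ""]) acc
      = acc ++ (data.drop a).take (b - a) := by
  rcases Nat.lt_or_ge a b with hab' | hab'
  · have hal : a < data.length := lt_of_lt_of_le hab' hb
    rw [PySem.List.pyRange_one_cons (by exact_mod_cast hab')]
    simp only [List.foldl_cons]
    have h1 : ((a : Int) + 1) = ((a + 1 : Nat) : Int) := by push_cast; ring
    rw [h1, subT data (a + 1) b hab' hb]
    rw [PySem.List.pyGetD_natCast, List.getD_eq_getElem data "" hal]
    rw [List.drop_eq_getElem_cons hal]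
    have h2 : b - a = (b - (a + 1)) + 1 := by omega
    rw [h2, List.take_succ_cons, List.append_assoc]
    rfl
  · have hba : b = a := le_antisymm hab' hab
    subst hba
    rw [PySem.List.pyRange_one_eq_nil (le_refl _)]
    simp
  termination_by b - a

theorem dict_update_eq (d : PySem.Dict String (List (List (List String)))) (k : String)
    (t : List (List String)) :
    (let d1 := if d.contains k = false then d.insert k [] else d;
     d1.insert k (d1.getD k [] ++ [t])) = d.modify k [] (· ++ [t]) := by
  by_cases h : d.contains k = true
  · simp only [h, PySem.Dict.modify]
    rfl
  · simp only [Bool.not_eq_true] at h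
    rw [if_pos h]
    show (d.insert k []).insert k ((d.insert k []).getD k [] ++ [t]) = _
    rw [PySem.Dict.getD_insert_self]
    simp only [PySem.Dict.modify]
    rw [PySem.Dict.getD_of_not_contains _ _ h]
    exact PySem.Dict.insert_insert_self d k [] ([] ++ [t])

theorem exemplar_eq (data : List String) (i e : Nat) (hie : i ≤ e) (he : e ≤ data.length) :
    [(PySem.List.pyRange 0 (i : Int) 1).foldl (fun acc j => acc ++ [PySem.List.pyGetD data j ""]) [],
     (PySem.List.pyRange (i : Int) (e : Int) 1).foldl (fun acc j => acc ++ [PySem.List.pyGetD data j ""]) [],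
     (PySem.List.pyRange (e : Int) (data.length : Int) 1).foldl (fun acc j => acc ++ [PySem.List.pyGetD data j ""]) []]
      = bExemplar data (i : Int) (e : Int) := by
  have h0 : ((0 : Int)) = ((0 : Nat) : Int) := by norm_num
  rw [h0, subT data 0 i (Nat.zero_le i) (le_trans hie he) [],
      subT data i e hie he [], subT data e data.length he (le_refl _) []]
  simp only [List.nil_append, List.drop_zero, Nat.sub_zero, bExemplar,
    PySem.List.slice_to_natCast, PySem.List.slice_natCast, PySem.List.slice_from_natCast]
  have h3 : List.take (data.length - e) (List.drop e data) = List.drop e data :=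
    List.take_of_length_le (by simp [List.length_drop])
  rw [h3]

theorem lemA (data label : List String) (i : Nat) (d : PySem.Dict String (List (List (List String)))) :
    aLine data label data.length i d = (spansFrom label data.length i).foldl (bUpd data) d := by
  rw [aLine, spansFrom]
  by_cases hi : i < data.length
  · by_cases hB : (label.getD i "").toList.head? = some 'B'
    · rw [dif_pos hi, dif_pos hi, if_pos hB, if_pos hB]
      simp only [List.foldl_cons]
      have hie : i ≤ min (aFindEnd label data.length (i + 1)) data.length := by
        have := aFindEnd_ge label data.length (i + 1); omega
      have he : min (aFindEnd label data.length (i + 1)) data.length ≤ data.length := min_le_right _ _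
      rw [lemA data label (min (aFindEnd label data.length (i + 1)) data.length) _]
      congr 1
      rw [dict_update_eq]
      unfold bUpd
      rw [← exemplar_eq data i _ hie he]
    · rw [dif_pos hi, dif_pos hi, if_neg hB, if_neg hB]
      exact lemA data label (i + 1) d
  · rw [dif_neg hi, dif_neg hi]
    simp
  termination_by data.length - i
  decreasing_by
  · have := aFindEnd_ge label data.length (i + 1); omega
  · omega

theorem aFindEnd_run (label : List String) (n e : Nat) (m : Nat) (h1 : e ≤ m)
    (h2 : m < aFindEnd label n e) : (label.getD m "").toList.head? = some 'I' := by
  rw [aFindEnd] at h2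
  split at h2
  · rcases Nat.eq_or_lt_of_le h1 with he | he
    · subst he; exact (by assumption : e < n ∧ _).2
    · exact aFindEnd_run label n (e + 1) m he h2
  · omega
  termination_by n - e
  decreasing_by
    rename_i hc; exact by omega

theorem aFindEnd_stop (label : List String) (n e : Nat) :
    ¬ (aFindEnd label n e < n ∧ (label.getD (aFindEnd label n e) "").toList.head? = some 'I') := by
  rw [aFindEnd]
  split
  · exact aFindEnd_stop label n (e + 1)
  · assumption
  termination_by n - e
  decreasing_by
    rename_i hc; exact by omega

theorem lemB_run (label : List String) (acc : List (String × Int × Int)) (name : String) (s : Int)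
    (j e : Nat) (hje : j ≤ e) (he : e ≤ label.length)
    (hrun : ∀ m, j ≤ m → m < e → (label.getD m "").toList.head? = some 'I') :
    (PySem.List.enumerate (label.drop j) (j : Int)).foldl bStep (acc ++ [(name, s, (j : Int))])
      = (PySem.List.enumerate (label.drop e) (e : Int)).foldl bStep (acc ++ [(name, s, (e : Int))]) := by
  rcases Nat.eq_or_lt_of_le hje with heq | hlt
  · subst heq; rfl
  · have hjl : j < label.length := lt_of_lt_of_le hlt he
    have hI : (label[j]).toList.head? = some 'I' := by
      have := hrun j (le_refl _) hlt
      rwa [List.getD_eq_getElem _ _ hjl] at this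
    rw [List.drop_eq_getElem_cons hjl, PySem.List.enumerate_cons]
    simp only [List.foldl_cons]
    have hstep : bStep (acc ++ [(name, s, (j : Int))]) ((j : Int), label[j])
        = acc ++ [(name, s, ((j + 1 : Nat) : Int))] := by
      unfold bStep
      rw [if_neg (by simp [hI]), if_pos (by simpa using hI)]
      simp only [List.getLast?_concat]
      rw [if_pos trivial, List.dropLast_concat]
      push_cast; ring_nf
    rw [hstep]
    have h1 : ((j : Int) + 1) = ((j + 1 : Nat) : Int) := by push_cast; ring
    rw [h1]
    exact lemB_run label acc name s (j + 1) e hlt he (fun m hm1 hm2 => hrun m (by omega) hm2)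
  termination_by e - j

theorem lemB (label : List String) (i : Nat) (acc : List (String × Int × Int)) (hi : i ≤ label.length)
    (hinv : ∀ p, acc.getLast? = some p → p.2.2 ≤ (i : Int) ∧
      (p.2.2 = (i : Int) → ¬ (label.getD i "").toList.head? = some 'I')) :
    (PySem.List.enumerate (label.drop i) (i : Int)).foldl bStep acc
      = acc ++ spansFrom label label.length i := by
  rw [spansFrom]
  by_cases hil : i < label.length
  · have hgd : label.getD i "" = label[i] := List.getD_eq_getElem _ _ hil
    rw [List.drop_eq_getElem_cons hil, PySem.List.enumerate_cons]
    simp only [List.foldl_cons]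
    by_cases hB : (label.getD i "").toList.head? = some 'B'
    · rw [dif_pos hil, if_pos hB]
      have hfge := aFindEnd_ge label label.length (i + 1)
      have hie : i + 1 ≤ min (aFindEnd label label.length (i + 1)) label.length := by omega
      have he : min (aFindEnd label label.length (i + 1)) label.length ≤ label.length :=
        min_le_right _ _
      have hstep : bStep acc ((i : Int), label[i])
          = acc ++ [(PySem.Str.slice (label.getD i "") (some 2) none, (i : Int), ((i + 1 : Nat) : Int))] := by
        unfold bStep
        rw [if_pos (by rw [hgd] at hB; simpa using hB)]
        rw [hgd]
        push_cast; ring_nf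
      rw [hstep]
      have hrun : ∀ m, i + 1 ≤ m → m < min (aFindEnd label label.length (i + 1)) label.length →
          (label.getD m "").toList.head? = some 'I' := by
        intro m hm1 hm2
        exact aFindEnd_run label label.length (i + 1) m hm1 (lt_of_lt_of_le hm2 (min_le_left _ _))
      have hcast : ((i : Int) + 1) = ((i + 1 : Nat) : Int) := by push_cast; ring
      rw [hcast]
      rw [lemB_run label acc _ _ (i + 1) (min (aFindEnd label label.length (i + 1)) label.length)
        hie he hrun]
      rw [lemB label (min (aFindEnd label label.length (i + 1)) label.length) _ he ?_]
      · rw [List.append_assoc]; rfl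
      · intro p hp
        rw [List.getLast?_concat] at hp
        cases hp
        refine ⟨le_refl _, fun _ hIe => ?_⟩
        by_cases hfe : aFindEnd label label.length (i + 1) < label.length
        · have hemin : min (aFindEnd label label.length (i + 1)) label.length
              = aFindEnd label label.length (i + 1) := by omega
          rw [hemin] at hIe
          exact aFindEnd_stop label label.length (i + 1) ⟨hfe, hIe⟩
        · have hemin : min (aFindEnd label label.length (i + 1)) label.length = label.length := by
            omega
          rw [hemin] at hIe
          rw [List.getD_eq_default _ _ (le_refl _)] at hIe
          simp at hIe
    · rw [dif_pos hil, if_neg hB]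
      have hstep : bStep acc ((i : Int), label[i]) = acc := by
        unfold bStep
        rw [if_neg (by rw [hgd] at hB; simpa using hB)]
        by_cases hI : (label[i]).toList.head? = some 'I'
        · rw [if_pos hI]
          cases hacc : acc.getLast? with
          | none => rfl
          | some p =>
            have h2 := hinv p hacc
            dsimp only
            rw [if_neg ?_]
            intro hpe
            exact absurd (by rw [hgd]; exact hI) (h2.2 hpe)
        · rw [if_neg hI]
      rw [hstep]
      have hcast : ((i : Int) + 1) = ((i + 1 : Nat) : Int) := by push_cast; ring
      rw [hcast]
      rw [lemB label (i + 1) acc (by omega) ?_]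
      intro p hp
      have := (hinv p hp).1
      constructor
      · push_cast; omega
      · intro hpe
        rw [hpe] at this
        exfalso
        push_cast at this
        omega
  · rw [dif_neg hil]
    rw [List.drop_eq_nil_of_le (by omega)]
    simp [PySem.List.enumerate_nil]
  termination_by label.length - i
  decreasing_by all_goals omega

theorem lemLine (data label : List String) (hlen : data.length = label.length)
    (d : PySem.Dict String (List (List (List String)))) :
    aLine data label data.length 0 d = bLine d data label := by
  rw [lemA data label 0 d]
  unfold bLine
  have hs : (PySem.List.enumerate label 0).foldl bStep [] = spansFrom label label.length 0 := by
    have h := lemB label 0 [] (Nat.zero_le _) (by intro p hp; simp at hp)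
    simpa using h
  rw [hs, hlen]
  rfl

theorem lem_fold (da : List (List String × List String))
    (d : PySem.Dict String (List (List (List String))))
    (h : ∀ line ∈ da, line.1.length = line.2.length) :
    da.foldl (fun d line => aLine line.1 line.2 line.1.length 0 d) d
      = da.foldl (fun d line => bLine d line.1 line.2) d := by
  induction da generalizing d with
  | nil => rfl
  | cons x xs ih =>
    simp only [List.foldl_cons]
    rw [lemLine x.1 x.2 (h x (by simp)) d]
    exact ih _ (fun line hl => h line (by simp [hl]))

-- ===== VERDICT (by name: the statement is the Claim_ definition above) =====
theorem prepareDataBySlot_spec : Claim_equal_prepareDataBySlot := by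
  intro da _ hpre
  unfold Spec_prepareDataBySlot prepareDataBySlot prepareDataBySlot_alt
  rw [lem_fold da _ (fun line hl => (hpre line hl).1)]
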